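-- pv_equiv track=rewrite | github.com/AI-Paul-Graham/Tutorial-YC-Partner | preprocess.py | chunk_indices
-- ===== SOURCE A (Python) =====
-- def chunk_indices(n, chunk_size=10000):
--     """
--     Given the size of a text (n characters), split into chunks of length `chunk_size`.
--     If the final chunk is < 50% of chunk_size, merge it with the previous chunk.
--     Returns a list of (start_index, end_index) pairs.
--     """
--     if n <= 0:
--         return []
--
--     chunks = []
--     start = 0
--     while start < n:
--         end = min(start + chunk_size, n)
--         chunks.append((start, end))
--         start = end
--
--     # Merge the last chunk if it's too small
--     if len(chunks) > 1:
--         last_start, last_end = chunks[-1]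
--         last_chunk_size = last_end - last_start
--         if last_chunk_size < (0.5 * chunk_size):
--             second_last_start, second_last_end = chunks[-2]
--             merged_chunk = (second_last_start, last_end)
--             chunks[-2] = merged_chunk
--             chunks.pop()
--
--     return chunks
-- ===== SOURCE B (Python) =====
-- def chunk_indices(n, chunk_size=10000):
--     """Closed-form: compute the number of chunks arithmetically with divmod
--     (applying the merge rule to the count), then emit the pairs directly."""
--     if n <= 0:
--         return []
--     q, r = divmod(n, chunk_size)
--     if r > 0 and (q == 0 or 2 * r >= chunk_size):
--         q += 1  # the remainder stands as its own chunk
--     # q chunks: the first q-1 are full, the last one ends at n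
--     return [(i * chunk_size, (i + 1) * chunk_size) for i in range(q - 1)] + [((q - 1) * chunk_size, n)]
-- ===== Notes on version B (the rewrite author's own statement) =====
-- stated objective: alternative
-- what changed: B replaces A's chunk-building while loop and the rewrite/pop merge of the last pair by a closed-form divmod computation: the merge rule is applied to the chunk COUNT (q incremented only when the remainder deserves its own chunk), and the pairs are then emitted directly by a comprehension over range.
import Mathlib
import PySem

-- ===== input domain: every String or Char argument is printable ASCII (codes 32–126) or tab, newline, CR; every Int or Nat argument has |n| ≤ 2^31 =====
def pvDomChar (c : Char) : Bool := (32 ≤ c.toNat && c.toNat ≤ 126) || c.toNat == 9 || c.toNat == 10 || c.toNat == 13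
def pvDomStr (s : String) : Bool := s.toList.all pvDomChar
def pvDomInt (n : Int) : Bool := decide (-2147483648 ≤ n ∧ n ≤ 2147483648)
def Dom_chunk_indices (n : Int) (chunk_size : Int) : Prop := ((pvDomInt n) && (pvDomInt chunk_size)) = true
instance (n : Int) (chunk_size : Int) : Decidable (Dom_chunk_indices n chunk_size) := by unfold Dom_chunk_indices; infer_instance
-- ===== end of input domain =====

-- B replaces A's chunk-building loop and rewrite/pop merge by a closed-form
-- divmod computation of the chunk count (merge rule applied to the count) and a
-- direct comprehension over range (objective: alternative algorithm, same cost).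


-- ===== PORT A =====
-- A's while loop as fuel recursion (fuel n.toNat suffices: with chunk_size ≥ 1
-- each iteration raises start by ≥ 1; fuel exhaustion only happens at start = n,
-- where the loop would exit anyway). acc holds the chunks in reverse order.
def chunkLoopA (n chunk_size : Int) : Nat → Int → List (Int × Int) → List (Int × Int)
  | 0, _, acc => acc.reverse
  | fuel+1, start, acc =>
    if start < n then
      let e := min (start + chunk_size) n
      chunkLoopA n chunk_size fuel e ((start, e) :: acc)
    else acc.reverse

-- the merge step on the chunk list; '2 * size < chunk_size' is exact for
-- Python's 'size < 0.5 * chunk_size' on |ints| ≤ 2^31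
def mergeLastA (chunk_size : Int) (chunks : List (Int × Int)) : List (Int × Int) :=
  match chunks.reverse with
  | (last_start, last_end) :: (second_last_start, _) :: rest =>
      if 2 * (last_end - last_start) < chunk_size then
        ((second_last_start, last_end) :: rest).reverse
      else chunks
  | _ => chunks

def chunk_indices (n : Int) (chunk_size : Int) : List (Int × Int) :=
  if n ≤ 0 then []
  else
    let chunks := chunkLoopA n chunk_size n.toNat 0 []
    if chunks.length > 1 then mergeLastA chunk_size chunks else chunks

-- ===== PORT B =====
-- Source B: q, r = divmod(n, chunk_size); merge rule applied to the count q;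
-- then the pairs are emitted directly by a comprehension over range(q - 1).
def chunk_indices_alt (n : Int) (chunk_size : Int) : List (Int × Int) :=
  if n ≤ 0 then []
  else
    match PySem.Int.divmod? n chunk_size with
    | none => []   -- Python raises ZeroDivisionError here (chunk_size = 0); outside Pre_
    | some (q0, r) =>
      let q := if 0 < r ∧ (q0 = 0 ∨ chunk_size ≤ 2 * r) then q0 + 1 else q0
      (PySem.List.pyRange 0 (q - 1) 1).map (fun i => (i * chunk_size, (i + 1) * chunk_size))
        ++ [((q - 1) * chunk_size, n)]

-- ===== PRECONDITION & SPEC =====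
-- Pre_ excludes chunk_size ≤ 0 with n > 0, where Python A's while loop never
-- terminates (no value is returned); A is fine on every other input.
def Pre_chunk_indices (n : Int) (chunk_size : Int) : Prop := n ≤ 0 ∨ 0 < chunk_size
instance (n : Int) (chunk_size : Int) : Decidable (Pre_chunk_indices n chunk_size) := by unfold Pre_chunk_indices; infer_instance
def pvWitness_chunk_indices : Int × Int := (25, 10)
def Spec_chunk_indices (n : Int) (chunk_size : Int) (out : List (Int × Int)) : Prop := out = chunk_indices_alt n chunk_size
instance (n : Int) (chunk_size : Int) (out : List (Int × Int)) : Decidable (Spec_chunk_indices n chunk_size out) := by unfold Spec_chunk_indices; infer_instance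

-- ===== CLAIM (what is proved, stated in full; the proofs are below) =====
def Claim_equal_chunk_indices : Prop := ∀ (n : Int) (chunk_size : Int), Dom_chunk_indices n chunk_size → Pre_chunk_indices n chunk_size → Spec_chunk_indices n chunk_size (chunk_indices n chunk_size)

-- ===== LEMMAS AND PROOFS =====

-- once start ≥ n the loop returns immediately, whatever the fuel
theorem loopA_stop (n cs : Int) (fuel : Nat) (s : Int) (acc : List (Int × Int))
    (h : ¬ s < n) : chunkLoopA n cs fuel s acc = acc.reverse := by
  cases fuel <;> simp [chunkLoopA, h]

-- closed form of A's loop from start = j*cs, for the (unique) K with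
-- (K-1)*cs < n ≤ K*cs: the remaining chunks are ((j+i)*cs, min ((j+i+1)*cs) n)
theorem loopA_closed (n cs K : Int) (hcs : 0 < cs) (hub : n ≤ K * cs) (hlb : (K - 1) * cs < n) :
    ∀ (fuel : Nat) (j : Int) (acc : List (Int × Int)), 0 ≤ j → j * cs < n →
      (n - j * cs).toNat ≤ fuel →
      chunkLoopA n cs fuel (j * cs) acc =
        acc.reverse ++ (List.range (K - j).toNat).map
          (fun i : Nat => ((j + i) * cs, min ((j + i + 1) * cs) n)) := by
  intro fuel
  induction fuel with
  | zero => intro j acc hj hjn hf; omega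
  | succ k ih =>
    intro j acc hj hjn hf
    have hjK : j < K := by
      by_contra hc
      have : K * cs ≤ j * cs := by
        apply mul_le_mul_of_nonneg_right _ (le_of_lt hcs); omega
      omega
    simp only [chunkLoopA, hjn, if_true]
    by_cases hlt : (j + 1) * cs < n
    · have he : min (j * cs + cs) n = (j + 1) * cs := by
        have h1 : j * cs + cs = (j + 1) * cs := by ring
        rw [h1]; exact min_eq_left (le_of_lt hlt)
      rw [he]
      have hfu : (n - (j + 1) * cs).toNat ≤ k := by
        have h1 : (j + 1) * cs = j * cs + cs := by ring
        omega
      rw [ih (j + 1) _ (by omega) hlt hfu]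
      have hKj : (K - j).toNat = (K - (j + 1)).toNat + 1 := by omega
      rw [hKj, List.range_succ_eq_map, List.map_cons, List.map_map]
      have hhead : ((j + (0:Nat)) * cs, min ((j + (0:Nat) + 1) * cs) n) = (j * cs, (j + 1) * cs) := by
        have : min ((j + 1) * cs) n = (j + 1) * cs := min_eq_left (le_of_lt hlt)
        simp [this]
      simp only [List.reverse_cons, List.append_assoc, List.singleton_append, hhead]
      congr 2
      apply List.map_congr_left
      intro i _
      have h1 : (j + 1 + (i : Int)) = (j + ((i + 1 : Nat) : Int)) := by push_cast; ring
      simp [Function.comp, Nat.succ_eq_add_one, h1]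
    · have he : min (j * cs + cs) n = n := by
        have h1 : j * cs + cs = (j + 1) * cs := by ring
        rw [h1]; exact min_eq_right (by omega)
      rw [he, loopA_stop n cs k n _ (by omega)]
      have hKj : K = j + 1 := by
        have h2 : (K - 1) * cs < (j + 1) * cs := by omega
        have h3 : K - 1 < j + 1 := lt_of_mul_lt_mul_right h2 (le_of_lt hcs)
        omega
      have h4 : (K - j).toNat = 1 := by omega
      rw [h4]
      have hmin : min ((j + 1) * cs) n = n := min_eq_right (by omega)
      simp [List.range_succ, hmin]

-- the closed-form chunk list, re-expressed the way B builds it: all inner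
-- min's resolve to (i+1)*cs and the last end resolves to n
theorem bridge (n cs : Int) (hcs : 0 < cs) (K : Int) (hK : 1 ≤ K)
    (hlb : (K - 1) * cs < n) (hub : n ≤ K * cs) :
    (List.range K.toNat).map (fun i : Nat => ((i : Int) * cs, min (((i : Int) + 1) * cs) n)) =
      (PySem.List.pyRange 0 (K - 1) 1).map (fun i => (i * cs, (i + 1) * cs))
        ++ [((K - 1) * cs, n)] := by
  have hm : K.toNat = (K.toNat - 1) + 1 := by omega
  rw [hm, List.range_succ, List.map_append]
  have hk1 : ((K.toNat - 1 : Nat) : Int) = K - 1 := by omega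
  congr 1
  · rw [PySem.List.pyRange_one, List.map_map]
    have h0 : (K - 1 - 0).toNat = K.toNat - 1 := by omega
    rw [h0]
    apply List.map_congr_left
    intro i hi
    have hilt : i < K.toNat - 1 := List.mem_range.mp hi
    have hle : ((i : Int) + 1) * cs ≤ (K - 1) * cs := by
      apply mul_le_mul_of_nonneg_right _ (le_of_lt hcs); omega
    have : min (((i : Int) + 1) * cs) n = ((i : Int) + 1) * cs :=
      min_eq_left (by omega)
    simp [this]
  · simp [hk1, min_eq_right hub]

-- ===== VERDICT (by name: the statement is the Claim_ definition above) =====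
theorem chunk_indices_spec : Claim_equal_chunk_indices := by
  intro n cs hdom hpre
  unfold Spec_chunk_indices chunk_indices chunk_indices_alt
  by_cases hn : n ≤ 0
  · simp [hn]
  · have hn0 : 0 < n := by omega
    have hcs : 0 < cs := by rcases hpre with h | h <;> omega
    have hcs0 : cs ≠ 0 := by omega
    simp only [hn, if_false]
    have hdm : PySem.Int.divmod? n cs
        = some (PySem.Int.floordiv n cs, PySem.Int.mod n cs) := by
      simp [PySem.Int.divmod?, PySem.Int.floordiv, PySem.Int.mod, hcs0]
    rw [hdm]
    set q := PySem.Int.floordiv n cs with hq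
    set r := PySem.Int.mod n cs with hr
    have hqr : q * cs + r = n := PySem.Int.floordiv_mul_add_mod n cs
    have hr0 : 0 ≤ r := PySem.Int.mod_nonneg n hcs
    have hrcs : r < cs := PySem.Int.mod_lt n hcs
    have hq0 : 0 ≤ q := by
      rw [hq]
      exact (PySem.Int.le_floordiv_iff_mul_le hcs).mpr (by omega)
    -- K = the number of chunks before the merge step
    set K : Int := q + (if 0 < r then 1 else 0) with hK
    have hub : n ≤ K * cs := by
      by_cases h : 0 < r
      · have : K * cs = q * cs + cs := by rw [hK]; simp [h]; ring
        omega
      · have hreq : r = 0 := by omega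
        have : K * cs = q * cs := by rw [hK]; simp [h]
        omega
    have hlb : (K - 1) * cs < n := by
      have : (K - 1) * cs = K * cs - cs := by ring
      by_cases h : 0 < r
      · have h2 : K * cs = q * cs + cs := by rw [hK]; simp [h]; ring
        omega
      · have hreq : r = 0 := by omega
        have h2 : K * cs = q * cs := by rw [hK]; simp [h]
        omega
    have hK1 : 1 ≤ K := by
      by_contra hc
      have : K * cs ≤ 0 * cs := by
        apply mul_le_mul_of_nonneg_right _ (le_of_lt hcs); omega
      simp at this; omega
    -- the loop's closed form
    have hloop := loopA_closed n cs K hcs hub hlb n.toNat 0 [] (le_refl 0)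
      (by omega) (by omega)
    simp only [zero_mul] at hloop
    have hzero : (fun i : Nat => (((0:Int) + i) * cs, min (((0:Int) + i + 1) * cs) n))
        = (fun i : Nat => ((i : Int) * cs, min (((i : Int) + 1) * cs) n)) := by
      funext i; simp
    rw [hzero] at hloop
    have hKsub : (K - 0).toNat = K.toNat := by omega
    rw [hKsub] at hloop
    simp only [List.reverse_nil, List.nil_append] at hloop
    rw [hloop]
    set L := (List.range K.toNat).map
      (fun i : Nat => ((i : Int) * cs, min (((i : Int) + 1) * cs) n)) with hL
    have hLlen : L.length = K.toNat := by rw [hL]; simp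
    have hLbr := bridge n cs hcs K hK1 hlb hub
    by_cases hK2 : 2 ≤ K
    · -- at least two chunks: the merge step runs
      have hlen : L.length > 1 := by omega
      simp only [hlen, if_true]
      -- split off the last two chunks of L
      have hsplit : PySem.List.pyRange 0 (K - 1) 1
          = PySem.List.pyRange 0 (K - 2) 1 ++ [K - 2] := by
        have := PySem.List.pyRange_one_succ_right (a := 0) (b := K - 2) (by omega)
        have h2 : K - 2 + 1 = K - 1 := by ring
        rw [h2] at this
        exact this
      have hLsplit : L = (PySem.List.pyRange 0 (K - 2) 1).map
            (fun i => (i * cs, (i + 1) * cs))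
          ++ [((K - 2) * cs, (K - 1) * cs), ((K - 1) * cs, n)] := by
        rw [hL, hLbr, hsplit]
        have h21 : K - 2 + 1 = K - 1 := by ring
        simp [h21]
      rw [hLsplit]
      have hrev : ((PySem.List.pyRange 0 (K - 2) 1).map (fun i => (i * cs, (i + 1) * cs))
          ++ [((K - 2) * cs, (K - 1) * cs), ((K - 1) * cs, n)]).reverse
          = ((K - 1) * cs, n) :: ((K - 2) * cs, (K - 1) * cs)
            :: ((PySem.List.pyRange 0 (K - 2) 1).map (fun i => (i * cs, (i + 1) * cs))).reverse := by
        simp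
      unfold mergeLastA
      rw [hrev]
      simp only []
      by_cases hmerge : 2 * (n - (K - 1) * cs) < cs
      · -- A merges; B's count stays q (i.e. K - 1)
        have hrpos : 0 < r := by
          by_contra h
          have hreq : r = 0 := by omega
          have hnr : ¬ 0 < r := by omega
          have h2 : K * cs = q * cs := by rw [hK]; simp [hnr]
          have h3 : (K - 1) * cs = K * cs - cs := by ring
          omega
        have hKq : K = q + 1 := by rw [hK]; simp [hrpos]
        have hlastr : n - (K - 1) * cs = r := by
          have : (K - 1) * cs = q * cs := by rw [hKq]; ring_nf
          omega
        have hq1 : q ≠ 0 := by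
          intro h; rw [h] at hKq; omega
        have hcond : ¬ (0 < r ∧ (q = 0 ∨ cs ≤ 2 * r)) := by
          intro ⟨_, hor⟩
          rcases hor with h | h
          · exact hq1 h
          · omega
        simp only [hmerge, if_true, hcond, if_false]
        have hqK : q - 1 = K - 2 := by omega
        rw [hqK]
        simp
      · -- A does not merge; B's count is K
        simp only [hmerge, if_false]
        have hcond : (if 0 < r ∧ (q = 0 ∨ cs ≤ 2 * r) then q + 1 else q) = K := by
          by_cases hrpos : 0 < r
          · have hKq : K = q + 1 := by rw [hK]; simp [hrpos]
            have hlastr : n - (K - 1) * cs = r := by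
              have : (K - 1) * cs = q * cs := by rw [hKq]; ring_nf
              omega
            have h2 : cs ≤ 2 * r := by omega
            simp [hrpos, h2, hKq]
          · have hKq : K = q := by rw [hK]; simp [hrpos]
            simp [hrpos, hKq]
        rw [hcond, ← hLbr, ← hL, hLsplit]
    · -- exactly one chunk: no merge on either side
      have hKeq : K = 1 := by omega
      have hlen : ¬ L.length > 1 := by omega
      simp only [hlen, if_false]
      have hcond : (if 0 < r ∧ (q = 0 ∨ cs ≤ 2 * r) then q + 1 else q) = K := by
        by_cases hrpos : 0 < r
        · have hKq : K = q + 1 := by rw [hK]; simp [hrpos]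
          have hqz : q = 0 := by omega
          simp [hrpos, hqz, hKq]
        · have hKq : K = q := by rw [hK]; simp [hrpos]
          simp [hrpos, hKq]
      rw [hcond, hL, hLbr]
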